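-- pv_equiv track=rewrite | github.com/kevinburke/scouting | update_sheet.py | build_team_rosters
-- ===== SOURCE A (Python) =====
-- from collections import defaultdict
--
-- def build_team_rosters(raw_rows):
--     """Return {team: [player, ...]} from raw data, sorted alphabetically."""
--     team_players = defaultdict(set)
--     for row in raw_rows:
--         team, player = row[0], row[1]
--         team_players[team].add(player)
--     return {
--         team: sorted(players)
--         for team, players in sorted(team_players.items())
--     }
-- ===== SOURCE B (Python) =====
-- def build_team_rosters(raw_rows):
--     """Return {team: [player, ...]} from raw data, sorted alphabetically."""
--     teams = sorted({row[0] for row in raw_rows})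
--     return {
--         team: sorted({row[1] for row in raw_rows if row[0] == team})
--         for team in teams
--     }
-- ===== Notes on version B (the rewrite author's own statement) =====
-- stated objective: alternative
-- what changed: Replaces A's one-pass defaultdict-of-sets accumulation plus sorted(items) with no dict at all: sort the distinct teams first, then build each roster by a per-team filtering set comprehension over the rows.
import Mathlib
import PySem

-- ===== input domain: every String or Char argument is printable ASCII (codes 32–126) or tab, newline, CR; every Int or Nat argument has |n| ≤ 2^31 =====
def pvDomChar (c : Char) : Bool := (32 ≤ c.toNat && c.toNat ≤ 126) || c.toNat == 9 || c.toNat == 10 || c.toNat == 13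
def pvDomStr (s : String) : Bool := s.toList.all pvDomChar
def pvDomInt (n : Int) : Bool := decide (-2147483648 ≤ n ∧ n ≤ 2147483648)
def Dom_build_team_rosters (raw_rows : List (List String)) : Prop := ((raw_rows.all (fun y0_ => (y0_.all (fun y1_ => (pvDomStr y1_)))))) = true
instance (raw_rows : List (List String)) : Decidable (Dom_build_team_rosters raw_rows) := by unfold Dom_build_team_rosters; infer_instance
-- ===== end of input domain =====

-- B replaces A's defaultdict-of-sets accumulation by a sorted distinct-team list with a
-- per-team filtering set-comprehension (different decomposition; objective: alternative).


-- row[0] / row[1]; Pre_ guarantees the index is in range, so the .getD default is never used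
def pvRow0 (row : List String) : String := (PySem.List.pyGet? row 0).getD ""
def pvRow1 (row : List String) : String := (PySem.List.pyGet? row 1).getD ""

-- ===== PORT A =====
-- defaultdict(set) loop, then {team: sorted(players) for team, players in sorted(items)}.
-- sorted(team_players.items()) compares the (team, set) tuples: dict keys are distinct, so the
-- comparison never reaches the set components — ported as sorting by the team key.
def build_team_rosters (raw_rows : List (List String)) : List (String × List String) :=
  let team_players : PySem.Dict String (PySem.Set String) :=
    raw_rows.foldl
      (fun d row => d.modify (pvRow0 row) PySem.Set.empty (fun s => s.add (pvRow1 row)))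
      PySem.Dict.empty
  (PySem.List.sorted team_players.items (fun p => p.1)).map
    (fun p => (p.1, PySem.List.sorted p.2 (fun x => x)))

-- ===== PORT B =====
-- teams = sorted({row[0] …}); per team a filtering set comprehension, sorted.
def build_team_rosters_alt (raw_rows : List (List String)) : List (String × List String) :=
  let teams : List String :=
    PySem.List.sorted (PySem.Set.ofList (raw_rows.map (fun row => pvRow0 row))) (fun t => t)
  teams.map (fun team =>
    (team,
      PySem.List.sorted
        (PySem.Set.ofList
          ((raw_rows.filter (fun row => pvRow0 row == team)).map (fun row => pvRow1 row)))
        (fun x => x)))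

-- ===== PRECONDITION & SPEC =====
-- Pre_ excludes exactly the rows shorter than 2 entries, on which A raises IndexError at row[1] (or row[0]).
def Pre_build_team_rosters (raw_rows : List (List String)) : Prop :=
  ∀ row ∈ raw_rows, 2 ≤ row.length
instance (raw_rows : List (List String)) : Decidable (Pre_build_team_rosters raw_rows) := by
  unfold Pre_build_team_rosters; infer_instance

def pvWitness_build_team_rosters : List (List String) :=
  [["a", "x"], ["b", "y"], ["a", "x"], ["a", "z"]]

def Spec_build_team_rosters (raw_rows : List (List String)) (out : List (String × List String)) : Prop :=
  out = build_team_rosters_alt raw_rows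
instance (raw_rows : List (List String)) (out : List (String × List String)) : Decidable (Spec_build_team_rosters raw_rows out) := by
  unfold Spec_build_team_rosters; infer_instance

-- ===== CLAIM (what is proved, stated in full; the proofs are below) =====
def Claim_equal_build_team_rosters : Prop := ∀ (raw_rows : List (List String)), Dom_build_team_rosters raw_rows → Pre_build_team_rosters raw_rows → Spec_build_team_rosters raw_rows (build_team_rosters raw_rows)

-- ===== LEMMAS AND PROOFS =====

-- the value the defaultdict loop leaves at key t: the players of team t added in list order
theorem pv_getD_fold (rows : List (List String)) (d : PySem.Dict String (PySem.Set String)) (t : String) :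
    (rows.foldl
      (fun d row => d.modify (pvRow0 row) PySem.Set.empty (fun s => s.add (pvRow1 row)))
      d).getD t PySem.Set.empty
    = PySem.Set.update (d.getD t PySem.Set.empty)
        ((rows.filter (fun row => pvRow0 row == t)).map (fun row => pvRow1 row)) := by
  induction rows generalizing d with
  | nil => rfl
  | cons r rs ih =>
    simp only [List.foldl_cons, List.filter_cons, ih]
    by_cases h : pvRow0 r = t
    · simp only [h, beq_self_eq_true, if_pos, List.map_cons, PySem.Dict.modify,
        PySem.Dict.getD_insert_self, PySem.Set.update, List.foldl_cons]
    · have hb : (pvRow0 r == t) = false := by simp [h]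
      simp only [hb, Bool.false_eq_true, if_false, PySem.Dict.modify]
      rw [PySem.Dict.getD_insert_of_ne _ _ _ (fun he => h he.symm)]

theorem pv_pairwise_lt_sorted {α : Type} [LinearOrder α] (xs : List α) (h : xs.Nodup) :
    List.Pairwise (· < ·) (PySem.List.sorted xs (fun x => x)) := by
  have hp := PySem.List.sorted_pairwise xs (fun x => x)
  have hn : (PySem.List.sorted xs (fun x => x) false).Nodup :=
    (PySem.List.sorted_perm xs (fun x => x) false).nodup_iff.mpr h
  exact (hp.and hn).imp (fun ⟨hle, hne⟩ => lt_of_le_of_ne hle hne)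

-- sorting the items of a Nodup-keyed map by key = mapping over the sorted keys
theorem pv_sorted_map_fst {ν : Type} (K : List String) (f : String → ν) (h : K.Nodup) :
    PySem.List.sorted (K.map (fun k => (k, f k))) (fun p => p.1)
    = (PySem.List.sorted K (fun x => x)).map (fun k => (k, f k)) := by
  apply PySem.List.sorted_eq_of_perm_of_pairwise_lt
  · exact ((PySem.List.sorted_perm K (fun x => x) false).map _)
  · have := pv_pairwise_lt_sorted K h
    exact (List.pairwise_map).mpr (by simpa using this)

-- ===== VERDICT (by name: the statement is the Claim_ definition above) =====
theorem build_team_rosters_spec : Claim_equal_build_team_rosters := by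
  intro raw_rows _ _
  unfold Spec_build_team_rosters build_team_rosters build_team_rosters_alt
  simp only []
  set F := fun (d : PySem.Dict String (PySem.Set String)) (row : List String) =>
    d.modify (pvRow0 row) PySem.Set.empty (fun s => s.add (pvRow1 row)) with hF
  have hkeys : (raw_rows.foldl F PySem.Dict.empty).keys
      = PySem.Set.ofList (raw_rows.map (fun row => pvRow0 row)) := by
    rw [hF]
    exact PySem.Dict.keys_foldl_modify_key raw_rows (fun row => pvRow0 row) PySem.Set.empty
      (fun _ row s => s.add (pvRow1 row)) PySem.Dict.empty
  have hnd : (raw_rows.foldl F PySem.Dict.empty).keys.Nodup := by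
    rw [hF]
    exact PySem.Dict.nodup_keys_foldl_modify_key raw_rows (fun row => pvRow0 row)
      PySem.Set.empty (fun _ row s => s.add (pvRow1 row)) PySem.Dict.empty List.nodup_nil
  have hitems := PySem.Dict.items_eq_map_keys (raw_rows.foldl F PySem.Dict.empty) hnd PySem.Set.empty
  rw [hitems, pv_sorted_map_fst _ _ hnd, hkeys, List.map_map]
  apply List.map_congr_left
  intro t _
  simp only [Function.comp_apply]
  congr 1
  rw [hF, pv_getD_fold]
  rfl
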